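-- pv_equiv track=rewrite | github.com/RotemEshet/semaphore-cam | cam_generator.py | expand_input
-- ===== SOURCE A (Python) =====
-- DIGIT_TO_LETTER = {'1':'A','2':'B','3':'C','4':'D','5':'E',
--                    '6':'F','7':'G','8':'H','9':'I','0':'K'}
--
-- def expand_input(text):
--     """
--     Convert raw text (may contain digits) into a sequence of semaphore
--     characters, inserting NUM and J signals automatically.
--     """
--     text = text.upper()
--     result = []
--     in_number_mode = False
--     for i, ch in enumerate(text):
--         if ch.isdigit():
--             if not in_number_mode:
--                 result.append('NUM')
--                 in_number_mode = True
--             result.append(DIGIT_TO_LETTER[ch])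
--         elif ch == ' ':
--             result.append(' ')
--         else:
--             if in_number_mode:
--                 remaining = text[i:]
--                 if any(c.isalpha() for c in remaining):
--                     result.append('J')
--                 in_number_mode = False
--             result.append(ch)
--     return result
-- ===== SOURCE B (Python) =====
-- DIGIT_TO_LETTER = {'1':'A','2':'B','3':'C','4':'D','5':'E',
--                    '6':'F','7':'G','8':'H','9':'I','0':'K'}
--
--
-- def _tokens(ch, prev, in_alpha_zone):
--     # number mode holds exactly when the last non-space char seen is a digit
--     num = prev is not None and prev.isdigit()
--     if ch.isdigit():
--         return [DIGIT_TO_LETTER[ch]] if num else ['NUM', DIGIT_TO_LETTER[ch]]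
--     if ch == ' ':
--         return [' ']
--     if num:
--         return (['J'] if in_alpha_zone else []) + [ch]
--     return [ch]
--
--
-- def expand_input(text):
--     text = text.upper()
--     last_alpha = -1
--     for i, ch in enumerate(text):
--         if ch.isalpha():
--             last_alpha = i
--     out = []
--     prev = None
--     for i, ch in enumerate(text):
--         out += _tokens(ch, prev, i <= last_alpha)
--         if ch != ' ':
--             prev = ch
--     return out
-- ===== Notes on version B (the rewrite author's own statement) =====
-- stated objective: alternative
-- what changed: Replaced A's rescan of the remaining text for letters at each number-mode exit by a single precomputed last-letter index, and replaced the boolean number-mode flag by tracking the last non-space character, with each character's tokens produced by a pure helper.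
import Mathlib
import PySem

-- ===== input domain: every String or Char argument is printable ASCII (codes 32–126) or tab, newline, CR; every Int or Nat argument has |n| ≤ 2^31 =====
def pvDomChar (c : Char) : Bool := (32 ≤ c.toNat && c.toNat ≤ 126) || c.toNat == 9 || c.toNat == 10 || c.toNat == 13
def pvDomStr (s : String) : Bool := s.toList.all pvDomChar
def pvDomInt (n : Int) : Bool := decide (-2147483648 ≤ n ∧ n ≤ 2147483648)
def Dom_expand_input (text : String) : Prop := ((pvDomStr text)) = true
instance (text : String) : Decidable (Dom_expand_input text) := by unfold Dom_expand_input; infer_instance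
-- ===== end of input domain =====

-- B replaces A's per-exit rescan of the remaining text for letters by one precomputed
-- last-letter index and tracks the last non-space character instead of a boolean mode flag
-- (objective: alternative).

-- DIGIT_TO_LETTER; lookup via getD "" is exact here: on the ASCII domain isdigit holds
-- only for '0'..'9', all present, so Python's KeyError is unreachable.
def pvDigitDict : PySem.Dict Char String :=
  PySem.Dict.mk [('1',"A"),('2',"B"),('3',"C"),('4',"D"),('5',"E"),
                 ('6',"F"),('7',"G"),('8',"H"),('9',"I"),('0',"K")]

-- ===== PORT A =====
-- loop body of A: state = (result, in_number_mode); text[i:] = slice cs (some i) none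
def pvStepA (cs : List Char) (st : List String × Bool) (p : Int × Char) : List String × Bool :=
  if PySem.Chars.isdigit p.2 then
    ((if !st.2 then st.1 ++ ["NUM"] else st.1) ++ [pvDigitDict.getD p.2 ""], true)
  else if p.2 = ' ' then
    (st.1 ++ [" "], st.2)
  else
    ((if st.2 && (PySem.List.slice cs (some p.1) none).any PySem.Chars.isalpha
        then st.1 ++ ["J"] else st.1) ++ [p.2.toString], false)

def expand_input (text : String) : List String :=
  let cs := (PySem.Str.upper text).toList
  ((PySem.List.enumerate cs 0).foldl (pvStepA cs) ([], false)).1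

-- ===== PORT B =====
def pvTokens (ch : Char) (prev : Option Char) (inAlphaZone : Bool) : List String :=
  let num := match prev with
    | some c => PySem.Chars.isdigit c
    | none => false
  if PySem.Chars.isdigit ch then
    if num then [pvDigitDict.getD ch ""] else ["NUM", pvDigitDict.getD ch ""]
  else if ch = ' ' then [" "]
  else if num then (if inAlphaZone then ["J"] else []) ++ [ch.toString]
  else [ch.toString]

-- B's first loop: last index holding a letter, -1 if none
def pvLastAlpha (cs : List Char) : Int :=
  (PySem.List.enumerate cs 0).foldl
    (fun la p => if PySem.Chars.isalpha p.2 then p.1 else la) (-1)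

def pvStepB (lastAlpha : Int) (st : List String × Option Char) (p : Int × Char) :
    List String × Option Char :=
  (st.1 ++ pvTokens p.2 st.2 (decide (p.1 ≤ lastAlpha)),
   if p.2 ≠ ' ' then some p.2 else st.2)

def expand_input_alt (text : String) : List String :=
  let cs := (PySem.Str.upper text).toList
  ((PySem.List.enumerate cs 0).foldl (pvStepB (pvLastAlpha cs)) ([], none)).1

-- ===== PRECONDITION & SPEC =====
def Spec_expand_input (text : String) (out : List String) : Prop := out = expand_input_alt text
instance (text : String) (out : List String) : Decidable (Spec_expand_input text out) := by unfold Spec_expand_input; infer_instance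

-- ===== CLAIM (what is proved, stated in full; the proofs are below) =====
def Claim_equal_expand_input : Prop := ∀ (text : String), Dom_expand_input text → Spec_expand_input text (expand_input text)

-- ===== LEMMAS AND PROOFS =====

-- B's number-mode reading of the prev-char state
def pvPrevNum (prev : Option Char) : Bool :=
  match prev with
  | some c => PySem.Chars.isdigit c
  | none => false

-- the last-alpha fold from an arbitrary start index and accumulator
def pvLaFold (l : List Char) (k la : Int) : Int :=
  (PySem.List.enumerate l k).foldl
    (fun la p => if PySem.Chars.isalpha p.2 then p.1 else la) la

theorem pvLaFold_nil (k la : Int) : pvLaFold [] k la = la := rfl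

theorem pvLaFold_cons (c : Char) (t : List Char) (k la : Int) :
    pvLaFold (c :: t) k la = pvLaFold t (k + 1) (if PySem.Chars.isalpha c then k else la) := by
  simp [pvLaFold, PySem.List.enumerate_cons]

theorem pvLaFold_mono (l : List Char) : ∀ (k la : Int), la ≤ k → la ≤ pvLaFold l k la := by
  induction l with
  | nil => intro k la h; simpa [pvLaFold_nil]
  | cons c t ih =>
    intro k la h
    rw [pvLaFold_cons]
    split
    · exact le_trans h (ih (k + 1) k (by omega))
    · exact ih (k + 1) la (by omega)

theorem pvLaFold_ge_iff_any (l : List Char) :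
    ∀ (k la i : Int), la < i → i ≤ k →
      (i ≤ pvLaFold l k la ↔ l.any PySem.Chars.isalpha = true) := by
  induction l with
  | nil => intro k la i h1 h2; simp [pvLaFold_nil]; omega
  | cons c t ih =>
    intro k la i h1 h2
    rw [pvLaFold_cons]
    by_cases hc : PySem.Chars.isalpha c = true
    · simp only [hc, if_true, List.any_cons, Bool.true_or, iff_true]
      exact le_trans h2 (pvLaFold_mono t (k + 1) k (by omega))
    · simp only [hc, if_false, List.any_cons, Bool.false_or]
      exact ih (k + 1) la i h1 (by omega)

theorem pvLaFold_drop (l : List Char) :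
    ∀ (k la : Int) (j : Nat), la < k →
      ((k + j : Int) ≤ pvLaFold l k la ↔ (l.drop j).any PySem.Chars.isalpha = true) := by
  induction l with
  | nil => intro k la j h; simp [pvLaFold_nil]; omega
  | cons c t ih =>
    intro k la j h
    cases j with
    | zero =>
      rw [pvLaFold_cons]
      by_cases hc : PySem.Chars.isalpha c = true
      · simp only [hc, if_true, List.drop_zero, List.any_cons, Bool.true_or, iff_true,
          Nat.cast_zero, add_zero]
        exact pvLaFold_mono t (k + 1) k (by omega)
      · simp only [hc, if_false, List.drop_zero, List.any_cons, Bool.false_or,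
          Nat.cast_zero, add_zero]
        exact pvLaFold_ge_iff_any t (k + 1) la k h (by omega)
    | succ j =>
      rw [pvLaFold_cons]
      have : (k + (j + 1 : Nat) : Int) = (k + 1) + j := by push_cast; ring
      rw [this, List.drop_succ_cons]
      exact ih (k + 1) _ j (by split <;> omega)

theorem pv_isdigit_ne_space {c : Char} (h : PySem.Chars.isdigit c = true) : c ≠ ' ' := by
  intro he; subst he; simp [PySem.Chars.isdigit] at h

-- the two loops agree whenever A's remaining-letters test agrees with B's index test
theorem pv_fold_eq (cs : List Char) (la : Int) :
    ∀ (l : List (Int × Char)) (res : List String) (inNum : Bool) (prev : Option Char),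
      inNum = pvPrevNum prev →
      (∀ p ∈ l, (PySem.List.slice cs (some p.1) none).any PySem.Chars.isalpha
          = decide (p.1 ≤ la)) →
      (l.foldl (pvStepA cs) (res, inNum)).1 = (l.foldl (pvStepB la) (res, prev)).1 := by
  intro l
  induction l with
  | nil => intro res inNum prev _ _; rfl
  | cons p t ih =>
    intro res inNum prev hrel hcond
    subst hrel
    simp only [List.foldl_cons]
    by_cases hd : PySem.Chars.isdigit p.2 = true
    · have hck : pvStepA cs (res, pvPrevNum prev) p
          = ((if !pvPrevNum prev then res ++ ["NUM"] else res) ++ [pvDigitDict.getD p.2 ""], true) := by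
        simp [pvStepA, hd]
      have hck' : pvStepB la (res, prev) p
          = (res ++ pvTokens p.2 prev (decide (p.1 ≤ la)), some p.2) := by
        simp [pvStepB, pv_isdigit_ne_space hd]
      rw [hck, hck']
      have htok : (if !pvPrevNum prev then res ++ ["NUM"] else res) ++ [pvDigitDict.getD p.2 ""]
          = res ++ pvTokens p.2 prev (decide (p.1 ≤ la)) := by
        cases prev with
        | none => simp [pvTokens, pvPrevNum, hd]
        | some c => cases hc : PySem.Chars.isdigit c <;>
            simp [pvTokens, pvPrevNum, hd, hc]
      rw [htok]
      exact ih _ _ _ (by simp [pvPrevNum, hd]) (fun q hq => hcond q (by simp [hq]))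
    · by_cases hs : p.2 = ' '
      · have hck : pvStepA cs (res, pvPrevNum prev) p = (res ++ [" "], pvPrevNum prev) := by
          simp [pvStepA, hs, show PySem.Chars.isdigit ' ' = false from by decide]
        have hck' : pvStepB la (res, prev) p = (res ++ [" "], prev) := by
          cases prev with
          | none => simp [pvStepB, pvTokens, hs, show PySem.Chars.isdigit ' ' = false from by decide]
          | some c => simp [pvStepB, pvTokens, hs, show PySem.Chars.isdigit ' ' = false from by decide]
        rw [hck, hck']
        exact ih _ _ _ rfl (fun q hq => hcond q (by simp [hq]))
      · have hck : pvStepA cs (res, pvPrevNum prev) p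
            = ((if pvPrevNum prev && (PySem.List.slice cs (some p.1) none).any PySem.Chars.isalpha
                then res ++ ["J"] else res) ++ [p.2.toString], false) := by
          simp [pvStepA, hd, hs]
        have hck' : pvStepB la (res, prev) p
            = (res ++ pvTokens p.2 prev (decide (p.1 ≤ la)), some p.2) := by
          simp [pvStepB, hs]
        rw [hck, hck', hcond p (by simp)]
        have htok : (if pvPrevNum prev && decide (p.1 ≤ la) then res ++ ["J"] else res) ++ [p.2.toString]
            = res ++ pvTokens p.2 prev (decide (p.1 ≤ la)) := by
          cases prev with
          | none => simp [pvTokens, pvPrevNum, hd, hs]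
          | some c => cases hc : PySem.Chars.isdigit c <;>
              cases hdec : decide (p.1 ≤ la) <;>
              simp [pvTokens, pvPrevNum, hd, hs, hc, hdec]
        rw [htok]
        exact ih _ _ _ (by simp [pvPrevNum, hd]) (fun q hq => hcond q (by simp [hq]))

-- ===== VERDICT (by name: the statement is the Claim_ definition above) =====
theorem expand_input_spec : Claim_equal_expand_input := by
  intro text _
  unfold Spec_expand_input expand_input expand_input_alt
  have hcond : ∀ p ∈ PySem.List.enumerate ((PySem.Str.upper text).toList) 0,
      (PySem.List.slice ((PySem.Str.upper text).toList) (some p.1) none).any PySem.Chars.isalpha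
        = decide (p.1 ≤ pvLastAlpha ((PySem.Str.upper text).toList)) := by
    intro p hp
    rcases (PySem.List.mem_enumerate_iff _ _ _).1 hp with ⟨j, hj, hpj⟩
    subst hpj
    simp only [zero_add]
    rw [PySem.List.slice_from_natCast]
    have h := pvLaFold_drop ((PySem.Str.upper text).toList) 0 (-1) j (by omega)
    simp only [zero_add] at h
    have hla : pvLastAlpha ((PySem.Str.upper text).toList)
        = pvLaFold ((PySem.Str.upper text).toList) 0 (-1) := rfl
    rw [hla]
    simp only [PySem.Str.toList_upper] at h ⊢
    by_cases hle : (j : Int) ≤ pvLaFold (PySem.Chars.upper text.toList) 0 (-1)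
    · simp only [hle, decide_true]
      exact h.1 hle
    · simp only [hle, decide_false]
      exact Bool.eq_false_iff.mpr (fun ha => hle (h.2 ha))
  exact pv_fold_eq ((PySem.Str.upper text).toList)
    (pvLastAlpha ((PySem.Str.upper text).toList))
    (PySem.List.enumerate ((PySem.Str.upper text).toList) 0) [] false none rfl hcond
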